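-- pv_equiv track=rewrite | github.com/jorch-wav/BIOPOEM | regenerate_full_gallery.py | guess_theme_from_title
-- ===== SOURCE A (Python) =====
-- def guess_theme_from_title(title):
--     """Try to guess theme from title keywords"""
--     title_lower = title.lower()
--
--     if any(word in title_lower for word in ['thirst', 'want', 'craving', 'need', 'dry']):
--         return 'thirsting'
--     elif any(word in title_lower for word in ['endur', 'persist', 'withstand']):
--         return 'enduring'
--     elif any(word in title_lower for word in ['sustain', 'maintain', 'steady', 'balance']):
--         return 'sustained'
--     elif any(word in title_lower for word in ['sated', 'full', 'overflow', 'abundance', 'wet']):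
--         return 'sated'
--     elif any(word in title_lower for word in ['recover', 'heal', 'return', 'bounce']):
--         return 'recovering'
--
--     return 'sustained'  # default
-- ===== SOURCE B (Python) =====
-- # Position-driven scan: walk the title once and, at each position, take the
-- # minimum-priority keyword that starts there; no early return, priority makes
-- # the branch order of A irrelevant.
-- _KEYWORD_PRIORITY = {
--     'thirst': 0, 'want': 0, 'craving': 0, 'need': 0, 'dry': 0,
--     'endur': 1, 'persist': 1, 'withstand': 1,
--     'sustain': 2, 'maintain': 2, 'steady': 2, 'balance': 2,
--     'sated': 3, 'full': 3, 'overflow': 3, 'abundance': 3, 'wet': 3,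
--     'recover': 4, 'heal': 4, 'return': 4, 'bounce': 4,
-- }
-- _THEMES = ['thirsting', 'enduring', 'sustained', 'sated', 'recovering']
--
--
-- def guess_theme_from_title(title):
--     """Try to guess theme from title keywords"""
--     t = title.lower()
--     best = 5
--     for i in range(len(t)):
--         for kw, pri in _KEYWORD_PRIORITY.items():
--             if pri < best and t.startswith(kw, i):
--                 best = pri
--     return _THEMES[best] if best < 5 else 'sustained'
-- ===== Notes on version B (the rewrite author's own statement) =====
-- stated objective: alternative
-- what changed: Replaced A's group-by-group substring search (if/elif chain of any-substring tests with early return) by a single position-driven scan of the title that keeps a running minimum keyword priority (order-independent min accumulator) and maps the final priority to its theme.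
import Mathlib
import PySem

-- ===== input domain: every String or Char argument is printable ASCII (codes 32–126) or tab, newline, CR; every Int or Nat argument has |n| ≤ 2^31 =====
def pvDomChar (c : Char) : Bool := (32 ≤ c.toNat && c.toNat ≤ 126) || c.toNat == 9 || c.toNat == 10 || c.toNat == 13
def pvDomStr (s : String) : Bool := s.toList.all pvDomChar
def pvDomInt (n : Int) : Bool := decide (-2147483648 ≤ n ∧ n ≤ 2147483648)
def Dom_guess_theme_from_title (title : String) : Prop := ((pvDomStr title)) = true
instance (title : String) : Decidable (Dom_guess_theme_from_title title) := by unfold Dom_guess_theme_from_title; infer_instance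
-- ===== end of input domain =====

-- B replaces A's group-by-group any-substring chain with a single position-driven
-- scan of the title keeping a running minimum keyword priority (alternative; same cost).

-- ===== PORT A =====
def guess_theme_from_title (title : String) : String :=
  let title_lower := PySem.Str.lower title
  if ["thirst", "want", "craving", "need", "dry"].any (fun w => PySem.Str.isIn w title_lower) then
    "thirsting"
  else if ["endur", "persist", "withstand"].any (fun w => PySem.Str.isIn w title_lower) then
    "enduring"
  else if ["sustain", "maintain", "steady", "balance"].any (fun w => PySem.Str.isIn w title_lower) then
    "sustained"
  else if ["sated", "full", "overflow", "abundance", "wet"].any (fun w => PySem.Str.isIn w title_lower) then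
    "sated"
  else if ["recover", "heal", "return", "bounce"].any (fun w => PySem.Str.isIn w title_lower) then
    "recovering"
  else
    "sustained"

-- ===== PORT B =====
-- _KEYWORD_PRIORITY dict (insertion order) and _THEMES list from Source B
def kwPriority : List (String × Nat) :=
  [("thirst", 0), ("want", 0), ("craving", 0), ("need", 0), ("dry", 0),
   ("endur", 1), ("persist", 1), ("withstand", 1),
   ("sustain", 2), ("maintain", 2), ("steady", 2), ("balance", 2),
   ("sated", 3), ("full", 3), ("overflow", 3), ("abundance", 3), ("wet", 3),
   ("recover", 4), ("heal", 4), ("return", 4), ("bounce", 4)]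

def themesB : List String := ["thirsting", "enduring", "sustained", "sated", "recovering"]

def guess_theme_from_title_alt (title : String) : String :=
  let t := (PySem.Str.lower title).toList
  -- t.startswith(kw, i) for 0 ≤ i is exactly: kw's chars are a prefix of t dropped by i
  let best := (List.range t.length).foldl (fun best i =>
      kwPriority.foldl (fun b p =>
        if p.2 < b ∧ PySem.Chars.startswith (t.drop i) p.1.toList then p.2 else b) best) 5
  if best < 5 then themesB.getD best "" else "sustained"  -- _THEMES[best] is in range when best < 5

-- ===== PRECONDITION & SPEC =====
def Spec_guess_theme_from_title (title : String) (out : String) : Prop := out = guess_theme_from_title_alt title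
instance (title : String) (out : String) : Decidable (Spec_guess_theme_from_title title out) := by unfold Spec_guess_theme_from_title; infer_instance

-- ===== CLAIM (what is proved, stated in full; the proofs are below) =====
def Claim_equal_guess_theme_from_title : Prop := ∀ (title : String), Dom_guess_theme_from_title title → Spec_guess_theme_from_title title (guess_theme_from_title title)

-- ===== LEMMAS AND PROOFS =====

-- the value B's double loop computes, named for the proofs
def pvBest (tl : List Char) : Nat :=
  (List.range tl.length).foldl (fun best i =>
      kwPriority.foldl (fun b p =>
        if p.2 < b ∧ PySem.Chars.startswith (tl.drop i) p.1.toList then p.2 else b) best) 5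

-- A's five group tests, on the char-list side
def pvGrp : Nat → List String
  | 0 => ["thirst", "want", "craving", "need", "dry"]
  | 1 => ["endur", "persist", "withstand"]
  | 2 => ["sustain", "maintain", "steady", "balance"]
  | 3 => ["sated", "full", "overflow", "abundance", "wet"]
  | 4 => ["recover", "heal", "return", "bounce"]
  | _ => []

def pvCond (tl : List Char) (k : Nat) : Bool :=
  (pvGrp k).any (fun w => PySem.Chars.isIn w.toList tl)

-- generic fold facts
theorem pvFoldLeInit {α : Type} (g : Nat → α → Nat) (hg : ∀ b x, g b x ≤ b) :
    ∀ (L : List α) (b : Nat), L.foldl g b ≤ b := by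
  intro L
  induction L with
  | nil => intro b; simp
  | cons x L ih =>
      intro b
      calc L.foldl g (g b x) ≤ g b x := ih _
        _ ≤ b := hg b x

theorem pvFoldLeMem {α : Type} (g : Nat → α → Nat) (hg : ∀ b x, g b x ≤ b)
    (x : α) (v : Nat) (hx : ∀ b, g b x ≤ v) :
    ∀ (L : List α) (b : Nat), x ∈ L → L.foldl g b ≤ v := by
  intro L
  induction L with
  | nil => intro b h; simp at h
  | cons y L ih =>
      intro b h
      rcases List.mem_cons.mp h with h | h
      · subst h
        calc L.foldl g (g b x) ≤ g b x := pvFoldLeInit g hg L (g b x)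
          _ ≤ v := hx b
      · exact ih (g b y) h

theorem pvFoldAchieved {α : Type} (g : Nat → α → Nat) (P : α → Nat → Prop)
    (hg : ∀ b x, g b x = b ∨ P x (g b x)) :
    ∀ (L : List α) (b : Nat), L.foldl g b = b ∨ ∃ x ∈ L, P x (L.foldl g b) := by
  intro L
  induction L with
  | nil => intro b; exact Or.inl rfl
  | cons x L ih =>
      intro b
      rcases ih (g b x) with h | ⟨y, hy, hP⟩
      · rcases hg b x with h2 | h2
        · left
          rw [List.foldl_cons, h2]
          rw [h2] at h
          exact h
        · right
          exact ⟨x, List.mem_cons_self .., by rw [List.foldl_cons, h]; exact h2⟩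
      · exact Or.inr ⟨y, List.mem_cons_of_mem _ hy, by rw [List.foldl_cons]; exact hP⟩

-- position ↔ substring bridges
theorem pvIsInOfPos (tl kw : List Char) (i : Nat)
    (h : PySem.Chars.startswith (tl.drop i) kw = true) :
    PySem.Chars.isIn kw tl = true :=
  (PySem.Chars.exists_prefix_drop_iff_isIn kw tl).mp
    ⟨i, (PySem.Chars.startswith_iff _ _).mp h⟩

theorem pvPosOfIsIn (tl kw : List Char) (hk : kw ≠ [])
    (h : PySem.Chars.isIn kw tl = true) :
    ∃ i ∈ List.range tl.length, PySem.Chars.startswith (tl.drop i) kw = true := by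
  obtain ⟨j, hj⟩ := (PySem.Chars.exists_prefix_drop_iff_isIn kw tl).mpr h
  by_cases hjl : j < tl.length
  · exact ⟨j, List.mem_range.mpr hjl, (PySem.Chars.startswith_iff _ _).mpr hj⟩
  · exfalso
    have : tl.drop j = [] := List.drop_eq_nil_of_le (by omega)
    rw [this] at hj
    exact hk (List.prefix_nil.mp hj)

-- bounds on pvBest
theorem pvInnerLeInit (tl : List Char) (i : Nat) :
    ∀ (b : Nat) (p : String × Nat), (if p.2 < b ∧ PySem.Chars.startswith (tl.drop i) p.1.toList then (p.2 : Nat) else b) ≤ b := by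
  intro b p; split_ifs with h
  · omega
  · exact le_refl b

theorem pvBest_le_five (tl : List Char) : pvBest tl ≤ 5 := by
  exact pvFoldLeInit _ (fun b i => pvFoldLeInit _ (pvInnerLeInit tl i) _ _) _ 5

theorem pvBest_le_of_isIn (tl : List Char) (p : String × Nat) (hp : p ∈ kwPriority)
    (h : PySem.Chars.isIn p.1.toList tl = true) : pvBest tl ≤ p.2 := by
  have hne : p.1.toList ≠ [] := by
    fin_cases hp <;> simp
  obtain ⟨i, hi, hsw⟩ := pvPosOfIsIn tl p.1.toList hne h
  refine pvFoldLeMem _ (fun b j => pvFoldLeInit _ (pvInnerLeInit tl j) _ _) i p.2 ?_ _ 5 hi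
  intro b
  refine pvFoldLeMem _ (pvInnerLeInit tl i) p p.2 ?_ _ b hp
  intro b'
  split_ifs with h2
  · exact le_refl _
  · rcases (not_and_or.mp h2) with h3 | h3
    · omega
    · exact absurd hsw h3

theorem pvBest_achieved (tl : List Char) :
    pvBest tl = 5 ∨ ∃ p ∈ kwPriority, PySem.Chars.isIn p.1.toList tl = true ∧ pvBest tl = p.2 := by
  have h := pvFoldAchieved
    (fun b i => kwPriority.foldl (fun b p =>
        if p.2 < b ∧ PySem.Chars.startswith (tl.drop i) p.1.toList then p.2 else b) b)
    (fun i v => ∃ p ∈ kwPriority, PySem.Chars.isIn p.1.toList tl = true ∧ v = p.2)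
    (fun b i => by
      have h2 := pvFoldAchieved
        (fun b p => if p.2 < b ∧ PySem.Chars.startswith (tl.drop i) p.1.toList then p.2 else b)
        (fun p v => PySem.Chars.isIn p.1.toList tl = true ∧ v = p.2)
        (fun b p => by
          dsimp only
          split_ifs with hc
          · exact Or.inr ⟨pvIsInOfPos tl p.1.toList i hc.2, rfl⟩
          · exact Or.inl rfl)
        kwPriority b
      rcases h2 with h2 | ⟨p, hp, hin, hv⟩
      · exact Or.inl h2
      · exact Or.inr ⟨p, hp, hin, hv⟩)
    (List.range tl.length) 5
  rcases h with h | ⟨i, _, p, hp, hin, hv⟩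
  · exact Or.inl h
  · exact Or.inr ⟨p, hp, hin, hv⟩

-- every table keyword with a substring hit makes its group's condition true
theorem pvHitCond (tl : List Char) (p : String × Nat) (hp : p ∈ kwPriority)
    (h : PySem.Chars.isIn p.1.toList tl = true) : pvCond tl p.2 = true := by
  fin_cases hp <;> simp_all [pvCond, pvGrp]

-- a true group condition bounds pvBest
theorem pvCond_le (tl : List Char) (k : Nat) (h : pvCond tl k = true) : pvBest tl ≤ k := by
  obtain ⟨w, hw, hin⟩ := List.any_eq_true.mp h
  have hmem : (w, k) ∈ kwPriority := by
    match k with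
    | 0 => fin_cases hw <;> simp [kwPriority]
    | 1 => fin_cases hw <;> simp [kwPriority]
    | 2 => fin_cases hw <;> simp [kwPriority]
    | 3 => fin_cases hw <;> simp [kwPriority]
    | 4 => fin_cases hw <;> simp [kwPriority]
    | (n+5) => simp [pvGrp] at hw
  exact pvBest_le_of_isIn tl (w, k) hmem hin

-- table priorities are ≤ 4
theorem pvPriLe (p : String × Nat) (hp : p ∈ kwPriority) : p.2 ≤ 4 := by
  fin_cases hp <;> simp

-- pvBest equals the rank of the first true condition (5 if none)
theorem pvBest_eq (tl : List Char) :
    pvBest tl = (if pvCond tl 0 then 0 else if pvCond tl 1 then 1 else if pvCond tl 2 then 2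
      else if pvCond tl 3 then 3 else if pvCond tl 4 then 4 else 5) := by
  have hach := pvBest_achieved tl
  have h5 := pvBest_le_five tl
  split_ifs with h0 h1 h2 h3 h4
  · have := pvCond_le tl 0 h0; omega
  · have hbk := pvCond_le tl 1 h1
    rcases hach with h | ⟨p, hp, hin, hv⟩
    · omega
    · have hc := pvHitCond tl p hp hin
      have hpl := pvPriLe p hp
      interval_cases hpv : p.2 <;> first | omega | simp_all
  · have hbk := pvCond_le tl 2 h2
    rcases hach with h | ⟨p, hp, hin, hv⟩
    · omega
    · have hc := pvHitCond tl p hp hin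
      have hpl := pvPriLe p hp
      interval_cases hpv : p.2 <;> first | omega | simp_all
  · have hbk := pvCond_le tl 3 h3
    rcases hach with h | ⟨p, hp, hin, hv⟩
    · omega
    · have hc := pvHitCond tl p hp hin
      have hpl := pvPriLe p hp
      interval_cases hpv : p.2 <;> first | omega | simp_all
  · have hbk := pvCond_le tl 4 h4
    rcases hach with h | ⟨p, hp, hin, hv⟩
    · omega
    · have hc := pvHitCond tl p hp hin
      have hpl := pvPriLe p hp
      interval_cases hpv : p.2 <;> first | omega | simp_all
  · rcases hach with h | ⟨p, hp, hin, hv⟩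
    · omega
    · have hc := pvHitCond tl p hp hin
      have hpl := pvPriLe p hp
      interval_cases hpv : p.2 <;> simp_all

-- ===== VERDICT (by name: the statement is the Claim_ definition above) =====
theorem guess_theme_from_title_spec : Claim_equal_guess_theme_from_title := by
  intro title _
  unfold Spec_guess_theme_from_title guess_theme_from_title guess_theme_from_title_alt
  have hb : ((List.range (PySem.Str.lower title).toList.length).foldl (fun best i =>
      kwPriority.foldl (fun b p =>
        if p.2 < b ∧ PySem.Chars.startswith ((PySem.Str.lower title).toList.drop i) p.1.toList then p.2 else b) best) 5)
      = pvBest (PySem.Str.lower title).toList := rfl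
  simp only [hb, pvBest_eq]
  have hc : ∀ k, (pvGrp k).any (fun w => PySem.Str.isIn w (PySem.Str.lower title)) = pvCond (PySem.Str.lower title).toList k := by
    intro k; simp [pvCond]
  have hc0 := hc 0; have hc1 := hc 1; have hc2 := hc 2; have hc3 := hc 3; have hc4 := hc 4
  simp only [pvGrp] at hc0 hc1 hc2 hc3 hc4
  rw [hc0, hc1, hc2, hc3, hc4]
  split_ifs <;> first | omega | simp [themesB]
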